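-- pv_equiv track=rewrite | github.com/ydraxx/xml-exception-tracer | home.py | extract_filter_values
-- ===== SOURCE A (Python) =====
-- from collections import defaultdict
--
-- def extract_filter_values(conditions):
--     """Extracts all possible filter values from the conditions."""
--     filter_values = defaultdict(set)
--     for condition in conditions:
--         parts = condition.split(',')
--         for part in parts:
--             if "==" in part:
--                 filter_name, value = part.split("==")
--                 filter_name = filter_name.strip()
--                 value = value.strip().replace(";", "")  # Remove semicolon if present
--                 filter_values[filter_name].add(value)
--     return {k: sorted(list(v)) for k, v in filter_values.items()}  # Convert sets to sorted lists
-- ===== SOURCE B (Python) =====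
-- def extract_filter_values(conditions):
--     """Extracts all possible filter values from the conditions."""
--     pairs = []
--     for condition in conditions:
--         for part in condition.split(','):
--             if "==" in part:
--                 name, value = part.split("==")
--                 pairs.append((name.strip(), value.strip().replace(";", "")))
--     names = []
--     for name, _ in pairs:
--         if name not in names:
--             names.append(name)
--     return {name: sorted({v for n, v in pairs if n == name}) for name in names}
-- ===== Notes on version B (the rewrite author's own statement) =====
-- stated objective: alternative
-- what changed: Instead of maintaining a dict of sets during the scan, B collects all parsed (name, value) pairs into one flat list, then builds the result by deduplicating names in first-seen order and taking the sorted set of each name's values with a per-name comprehension.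
import Mathlib
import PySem

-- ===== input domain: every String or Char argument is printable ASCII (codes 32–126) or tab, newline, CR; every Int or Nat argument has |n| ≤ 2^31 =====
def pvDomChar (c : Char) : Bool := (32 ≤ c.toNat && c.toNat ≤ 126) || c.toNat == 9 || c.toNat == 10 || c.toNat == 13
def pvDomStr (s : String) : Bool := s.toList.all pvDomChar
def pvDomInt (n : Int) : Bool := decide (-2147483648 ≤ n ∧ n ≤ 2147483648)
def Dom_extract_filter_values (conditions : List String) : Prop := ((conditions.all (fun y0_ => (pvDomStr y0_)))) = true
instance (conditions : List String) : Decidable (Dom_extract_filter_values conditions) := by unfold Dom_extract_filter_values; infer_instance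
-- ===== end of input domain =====

-- B replaces A's incrementally-maintained dict of sets by a flat pair list grouped per name afterwards (alternative decomposition, same results).


-- ===== PORT A =====
def extract_filter_values (conditions : List String) : List (String × List String) :=
  let filter_values : PySem.Dict String (PySem.Set String) :=
    conditions.foldl (fun d condition =>
      (((PySem.Str.split? condition ",").getD [])).foldl (fun d part =>
        if PySem.Str.isIn "==" part then
          match ((PySem.Str.split? part "==").getD []) with
          | [filter_name, value] =>
              d.modify (PySem.Str.strip filter_name) PySem.Set.empty
                (fun s => PySem.Set.add s (PySem.Str.replace (PySem.Str.strip value) ";" ""))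
          | _ => d  -- Python raises ValueError (unpacking ≠ 2 pieces); excluded by Pre_
        else d) d) PySem.Dict.empty
  filter_values.items.map (fun p => (p.1, PySem.List.sorted p.2 (fun x => x) false))

-- ===== PORT B =====
-- 'name, value = part.split("==")' when '==' in part; none is Python's ValueError (≠ 2 pieces), excluded by Pre_
def pvParsePart (part : String) : Option (String × String) :=
  if PySem.Str.isIn "==" part then
    let pieces := (PySem.Str.split? part "==").getD []
    if pieces.length = 2 then
      some (PySem.Str.strip (pieces.headD ""),
            PySem.Str.replace (PySem.Str.strip (pieces.getD 1 "")) ";" "")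
    else none
  else none

def extract_filter_values_alt (conditions : List String) : List (String × List String) :=
  let pairs : List (String × String) :=
    conditions.flatMap (fun condition => (((PySem.Str.split? condition ",").getD [])).filterMap pvParsePart)
  let names : PySem.Set String :=
    pairs.foldl (fun ns p => PySem.Set.add ns p.1) PySem.Set.empty
  names.map (fun name =>
    (name, PySem.List.sorted
      (PySem.Set.ofList ((pairs.filter (fun p => p.1 == name)).map Prod.snd))
      (fun x => x) false))

-- ===== PRECONDITION & SPEC =====
-- Pre_ excludes exactly the inputs where Python A raises ValueError: some comma-part contains '==' two or more times,
-- so 'filter_name, value = part.split("==")' gets more than two pieces.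
def Pre_extract_filter_values (conditions : List String) : Prop :=
  ∀ c ∈ conditions, ∀ part ∈ ((PySem.Str.split? c ",").getD []), PySem.Str.count part "==" ≤ 1
instance (conditions : List String) : Decidable (Pre_extract_filter_values conditions) := by unfold Pre_extract_filter_values; infer_instance
def pvWitness_extract_filter_values : List String := ["a==1,b == 2;", "a==3"]

def Spec_extract_filter_values (conditions : List String) (out : List (String × List String)) : Prop := out = extract_filter_values_alt conditions
instance (conditions : List String) (out : List (String × List String)) : Decidable (Spec_extract_filter_values conditions out) := by unfold Spec_extract_filter_values; infer_instance

-- ===== CLAIM (what is proved, stated in full; the proofs are below) =====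
def Claim_equal_extract_filter_values : Prop := ∀ (conditions : List String), Dom_extract_filter_values conditions → Pre_extract_filter_values conditions → Spec_extract_filter_values conditions (extract_filter_values conditions)

-- ===== LEMMAS AND PROOFS =====

-- A's per-part branch IS 'match pvParsePart part with …'
lemma stepA_eq_parse (d : PySem.Dict String (PySem.Set String)) (part : String) :
    (if PySem.Str.isIn "==" part then
      match ((PySem.Str.split? part "==").getD []) with
      | [filter_name, value] =>
          d.modify (PySem.Str.strip filter_name) PySem.Set.empty
            (fun s => PySem.Set.add s (PySem.Str.replace (PySem.Str.strip value) ";" ""))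
      | _ => d
      else d)
    = (pvParsePart part).elim d (fun p => d.modify p.1 PySem.Set.empty (fun s => PySem.Set.add s p.2)) := by
  unfold pvParsePart
  cases h : PySem.Str.isIn "==" part
  · simp
  · cases hs : ((PySem.Str.split? part "==").getD []) with
    | nil => simp
    | cons a t => cases t with
      | nil => simp
      | cons b t2 => cases t2 <;> simp [List.getD]

-- a fold that acts only through an Option-parse is a fold over the filterMap
lemma foldl_match_filterMap {α β γ : Type} (f : α → Option β) (g : γ → β → γ)
    (l : List α) (init : γ) :
    l.foldl (fun acc x => (f x).elim acc (fun y => g acc y)) init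
    = (l.filterMap f).foldl g init := by
  induction l generalizing init with
  | nil => rfl
  | cons a t ih =>
    simp only [List.foldl_cons, List.filterMap_cons]
    cases f a <;> simp [ih]

-- a nested fold over pieces of each condition is a fold over the flatMap
lemma foldl_foldl_flatMap {α β γ : Type} (h : α → List β) (g : γ → β → γ)
    (l : List α) (init : γ) :
    l.foldl (fun acc x => (h x).foldl g acc) init = (l.flatMap h).foldl g init := by
  induction l generalizing init with
  | nil => rfl
  | cons a t ih => simp [List.flatMap_cons, List.foldl_append, ih]

-- the grouping fold: getD of the accumulated dict collects exactly this key's values, in order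
lemma getD_foldl_modify_setadd (l : List (String × String))
    (d : PySem.Dict String (PySem.Set String)) (n : String) :
    (l.foldl (fun d p => d.modify p.1 PySem.Set.empty (fun s => PySem.Set.add s p.2)) d).getD n PySem.Set.empty
    = PySem.Set.update (d.getD n PySem.Set.empty) ((l.filter (fun p => p.1 == n)).map Prod.snd) := by
  induction l generalizing d with
  | nil => simp [PySem.Set.update]
  | cons p t ih =>
    simp only [List.foldl_cons, List.filter_cons]
    by_cases hp : p.1 = n
    · rw [ih, hp, PySem.Dict.getD_modify_self]
      simp [PySem.Set.update_cons]
    · rw [ih, PySem.Dict.getD_modify_of_ne _ _ _ (Ne.symm hp)]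
      have hb : (p.1 == n) = false := by simp [hp]
      simp [hb]

theorem extract_filter_values_spec_aux (conditions : List String) :
    extract_filter_values conditions = extract_filter_values_alt conditions := by
  unfold extract_filter_values extract_filter_values_alt
  dsimp only
  set pairs := conditions.flatMap (fun condition => (((PySem.Str.split? condition ",").getD [])).filterMap pvParsePart) with hpairs
  have hstep : ∀ (d : PySem.Dict String (PySem.Set String)),
      conditions.foldl (fun d condition =>
        (((PySem.Str.split? condition ",").getD [])).foldl (fun d part =>
          if PySem.Str.isIn "==" part then
            match ((PySem.Str.split? part "==").getD []) with
            | [filter_name, value] =>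
                d.modify (PySem.Str.strip filter_name) PySem.Set.empty
                  (fun s => PySem.Set.add s (PySem.Str.replace (PySem.Str.strip value) ";" ""))
            | _ => d
          else d) d) d
      = pairs.foldl (fun d p => d.modify p.1 PySem.Set.empty (fun s => PySem.Set.add s p.2)) d := by
    intro d
    have h1 : ∀ (c : String) (d : PySem.Dict String (PySem.Set String)),
        (((PySem.Str.split? c ",").getD [])).foldl (fun d part =>
          if PySem.Str.isIn "==" part then
            match ((PySem.Str.split? part "==").getD []) with
            | [filter_name, value] =>
                d.modify (PySem.Str.strip filter_name) PySem.Set.empty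
                  (fun s => PySem.Set.add s (PySem.Str.replace (PySem.Str.strip value) ";" ""))
            | _ => d
          else d) d
        = ((((PySem.Str.split? c ",").getD [])).filterMap pvParsePart).foldl
            (fun d p => d.modify p.1 PySem.Set.empty (fun s => PySem.Set.add s p.2)) d := by
      intro c d
      rw [← foldl_match_filterMap]
      exact PySem.List.foldl_congr_mem _ _ _ _ (fun acc x _ => stepA_eq_parse acc x)
    calc _ = conditions.foldl (fun d c => ((((PySem.Str.split? c ",").getD [])).filterMap pvParsePart).foldl
              (fun d p => d.modify p.1 PySem.Set.empty (fun s => PySem.Set.add s p.2)) d) d := by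
              exact PySem.List.foldl_congr_mem _ _ _ _ (fun acc c _ => h1 c acc)
      _ = _ := by rw [foldl_foldl_flatMap]
  rw [hstep]
  set D := pairs.foldl (fun d p => d.modify p.1 PySem.Set.empty (fun s => PySem.Set.add s p.2)) PySem.Dict.empty with hD
  have hnd : D.keys.Nodup := by
    rw [hD]
    exact PySem.Dict.nodup_keys_foldl_modify_key pairs Prod.fst PySem.Set.empty _ PySem.Dict.empty PySem.Dict.nodup_keys_empty
  have hkeys : D.keys = PySem.Set.ofList (pairs.map Prod.fst) := by
    rw [hD, PySem.Dict.keys_foldl_modify_key]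
    simp [PySem.Dict.keys, PySem.Dict.empty, PySem.Set.update_nil_left]
  have hitems := PySem.Dict.items_eq_map_keys D hnd PySem.Set.empty
  rw [hitems, hkeys, List.map_map]
  have hnames : pairs.foldl (fun ns p => PySem.Set.add ns p.1) PySem.Set.empty
      = PySem.Set.ofList (pairs.map Prod.fst) := by
    rw [← PySem.Set.update_map_eq_foldl_add, PySem.Set.update_empty]
  rw [hnames]
  apply List.map_congr_left
  intro n _
  simp only [Function.comp]
  congr 1
  rw [hD, getD_foldl_modify_setadd]
  simp [PySem.Dict.getD_empty, PySem.Set.update_nil_left]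

-- ===== VERDICT (by name: the statement is the Claim_ definition above) =====
theorem extract_filter_values_spec : Claim_equal_extract_filter_values := by
  intro conditions _ _
  unfold Spec_extract_filter_values
  exact extract_filter_values_spec_aux conditions
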